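-- pv_equiv track=rewrite | github.com/SSAFY-6-1-3/Algorithm | 1223/p_42862_junh.py | solution
-- ===== SOURCE A (Python) =====
-- def solution(n, lost, reserve):
--     answer = 0
--     lost, reserve = set(lost), set(reserve)
--     lost, reserve = lost - reserve, reserve - lost  # 순서에 유의
--     lost, reserve = sorted(lost), sorted(reserve)
--
--     for i in range(len(reserve)-1, -1, -1):
--         r = reserve[i]
--         if lost.count(r) > 0: continue
--         if r<n and lost.count(r+1):
--             r_p = lost.index(r+1)
--             if r_p > -1:
--                 lost.pop(r_p)
--                 continue
--         if r>0 and lost.count(r-1):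
--             r_m = lost.index(r-1)
--             if r_m > -1:
--                 lost.pop(r_m)
--
--     return n - len(lost)
-- ===== SOURCE B (Python) =====
-- def solution(n, lost, reserve):
--     # descending two-pointer sweep over the two sorted, disjoint difference sets
--     L = sorted(set(lost) - set(reserve), reverse=True)
--     R = sorted(set(reserve) - set(lost), reverse=True)
--     i = j = matched = 0
--     while i < len(L) and j < len(R):
--         l, r = L[i], R[j]
--         if l == r + 1 and r < n:
--             matched += 1
--             i += 1
--             j += 1
--         elif l > r:
--             i += 1
--         elif l == r - 1 and r > 0:
--             matched += 1
--             i += 1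
--             j += 1
--         else:
--             j += 1
--     return n - (len(L) - matched)
-- ===== Notes on version B (the rewrite author's own statement) =====
-- stated objective: faster
-- what changed: A repeatedly scans and mutates the sorted lost list (count/index/pop) once per reserve value; B instead sorts both difference sets descending and runs a single two-pointer sweep that counts matches, so every inner scan disappears.
import Mathlib
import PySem

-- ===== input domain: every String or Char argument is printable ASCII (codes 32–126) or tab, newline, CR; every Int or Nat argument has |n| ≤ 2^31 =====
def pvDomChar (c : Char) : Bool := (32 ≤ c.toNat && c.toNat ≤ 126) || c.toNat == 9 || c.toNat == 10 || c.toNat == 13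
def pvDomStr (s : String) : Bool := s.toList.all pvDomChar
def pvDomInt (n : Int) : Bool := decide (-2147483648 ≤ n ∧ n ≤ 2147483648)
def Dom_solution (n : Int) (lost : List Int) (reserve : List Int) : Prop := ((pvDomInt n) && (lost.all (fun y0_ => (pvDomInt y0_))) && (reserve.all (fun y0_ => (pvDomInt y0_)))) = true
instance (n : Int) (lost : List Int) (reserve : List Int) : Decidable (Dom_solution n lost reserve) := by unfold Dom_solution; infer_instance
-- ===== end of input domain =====

-- B replaces A's per-reserve inner scans of the lost list (count/index/pop) by a single
-- descending two-pointer sweep over the two sorted difference sets.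

-- ===== PORT A =====
def solutionStep (n : Int) (ls : List Int) (r : Int) : List Int :=
  if 0 < PySem.List.count ls r then ls
  else if r < n ∧ 0 < PySem.List.count ls (r + 1) then
    match PySem.List.index? ls (r + 1) with
    | some rp =>
      if ((rp : Int)) > -1 then
        match PySem.List.pop? ls ((rp : Nat) : Int) with
        | some p => p.2
        | none => ls
      else solutionMinus n ls r
    | none => solutionMinus n ls r
  else solutionMinus n ls r
where
  solutionMinus (n : Int) (ls : List Int) (r : Int) : List Int :=
    if r > 0 ∧ 0 < PySem.List.count ls (r - 1) then
      match PySem.List.index? ls (r - 1) with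
      | some rm =>
        if ((rm : Int)) > -1 then
          match PySem.List.pop? ls ((rm : Nat) : Int) with
          | some p => p.2
          | none => ls
        else ls
      | none => ls
    else ls

def solution (n : Int) (lost : List Int) (reserve : List Int) : Int :=
  let lostS := PySem.Set.ofList lost
  let resS := PySem.Set.ofList reserve
  let lost1 := PySem.Set.diff lostS resS
  let res1 := PySem.Set.diff resS lostS
  let lostL := PySem.List.sorted lost1 (fun x => x) false
  let resL := PySem.List.sorted res1 (fun x => x) false
  let final := (PySem.List.pyRange (PySem.List.len resL - 1) (-1) (-1)).foldl
      (fun ls i => solutionStep n ls (PySem.List.pyGetD resL i 0)) lostL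
  n - PySem.List.len final

-- ===== PORT B =====
-- the while loop of Source B: the index pair (i, j) walks the two descending lists, kept here as list suffixes
def solutionAltGo (n : Int) : List Int → List Int → Int → Int
  | [], _, m => m
  | _ :: _, [], m => m
  | l :: L, r :: R, m =>
    if l = r + 1 ∧ r < n then solutionAltGo n L R (m + 1)
    else if l > r then solutionAltGo n L (r :: R) m
    else if l = r - 1 ∧ r > 0 then solutionAltGo n L R (m + 1)
    else solutionAltGo n (l :: L) R m
termination_by L R _ => L.length + R.length

def solution_alt (n : Int) (lost : List Int) (reserve : List Int) : Int :=
  let L := PySem.List.sorted (PySem.Set.diff (PySem.Set.ofList lost) (PySem.Set.ofList reserve)) (fun x => x) true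
  let R := PySem.List.sorted (PySem.Set.diff (PySem.Set.ofList reserve) (PySem.Set.ofList lost)) (fun x => x) true
  n - (PySem.List.len L - solutionAltGo n L R 0)

-- ===== PRECONDITION & SPEC =====
def Spec_solution (n : Int) (lost : List Int) (reserve : List Int) (out : Int) : Prop := out = solution_alt n lost reserve
instance (n : Int) (lost : List Int) (reserve : List Int) (out : Int) : Decidable (Spec_solution n lost reserve out) := by unfold Spec_solution; infer_instance

-- ===== CLAIM (what is proved, stated in full; the proofs are below) =====
def Claim_equal_solution : Prop := ∀ (n : Int) (lost : List Int) (reserve : List Int), Dom_solution n lost reserve → Spec_solution n lost reserve (solution n lost reserve)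

-- ===== LEMMAS AND PROOFS =====

-- count over ++[l] for a different value
lemma count_append_single_ne (xs : List Int) (l v : Int) (h : l ≠ v) :
    PySem.List.count (xs ++ [l]) v = PySem.List.count xs v := by
  simp [PySem.List.count_eq, List.count_append, h]

lemma step_dead (n r l : Int) (xs : List Int) (hd : l > r + 1 ∨ (l = r + 1 ∧ ¬ r < n)) :
    solutionStep n (xs ++ [l]) r = solutionStep n xs r ++ [l] := by
  have hlr : l ≠ r := by rcases hd with h | ⟨h, _⟩ <;> omega
  have hlm : l ≠ r - 1 := by rcases hd with h | ⟨h, _⟩ <;> omega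
  have hcr := count_append_single_ne xs l r hlr
  have hcm := count_append_single_ne xs l (r - 1) hlm
  by_cases h0 : 0 < PySem.List.count xs r
  · simp only [solutionStep, hcr, h0, if_pos]
  · have hplus : (r < n ∧ 0 < PySem.List.count (xs ++ [l]) (r + 1)) ↔
        (r < n ∧ 0 < PySem.List.count xs (r + 1)) := by
      rcases hd with h | ⟨h, hn⟩
      · rw [count_append_single_ne xs l (r+1) (by omega)]
      · constructor <;> (rintro ⟨h1, h2⟩; exact absurd h1 hn)
    -- the r-1 block commutes
    have hminus : solutionStep.solutionMinus n (xs ++ [l]) r = solutionStep.solutionMinus n xs r ++ [l] := by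
      by_cases h2 : r > 0 ∧ 0 < PySem.List.count xs (r - 1)
      · have hmem : (r - 1) ∈ xs := by
          have := h2.2; rw [PySem.List.count_eq] at this; exact List.count_pos_iff.mp this
        have hnm : (r - 1) ∉ [l] := by simp [hlm.symm]  -- unused?
        obtain ⟨rp, hrp⟩ := Option.isSome_iff_exists.mp ((PySem.List.index?_isSome_iff _ _).mpr hmem)
        have hrp' : PySem.List.index? (xs ++ [l]) (r - 1) = some rp := by
          rw [PySem.List.index?_append_of_mem _ hmem]; exact hrp
        obtain ⟨hk, hget, -⟩ := PySem.List.getElem_of_index?_eq_some hrp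
        have hpop1 := PySem.List.pop?_natCast (xs ++ [l]) rp (by simp; omega)
        have hpop2 := PySem.List.pop?_natCast xs rp hk
        have herase : (xs ++ [l]).eraseIdx rp = xs.eraseIdx rp ++ [l] :=
          List.eraseIdx_append_of_lt_length hk _
        simp only [solutionStep.solutionMinus, hcm, h2.1, h2.2, hrp, hrp', hpop1, hpop2, herase,
          if_true, and_self]
        split_ifs with hx
        · rfl
        · exfalso; omega
      · have h2' : ¬ (r > 0 ∧ 0 < PySem.List.count (xs ++ [l]) (r - 1)) := by rw [hcm]; exact h2
        simp only [solutionStep.solutionMinus, h2, h2', if_neg, not_false_iff]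
    by_cases h1 : r < n ∧ 0 < PySem.List.count xs (r + 1)
    · have hl1 : l ≠ r + 1 := by rcases hd with h | ⟨h, hn⟩; omega; exact absurd h1.1 hn
      have hmem : (r + 1) ∈ xs := by
        have := h1.2; rw [PySem.List.count_eq] at this; exact List.count_pos_iff.mp this
      obtain ⟨rp, hrp⟩ := Option.isSome_iff_exists.mp ((PySem.List.index?_isSome_iff _ _).mpr hmem)
      have hrp' : PySem.List.index? (xs ++ [l]) (r + 1) = some rp := by
        rw [PySem.List.index?_append_of_mem _ hmem]; exact hrp
      obtain ⟨hk, hget, -⟩ := PySem.List.getElem_of_index?_eq_some hrp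
      have hpop1 := PySem.List.pop?_natCast (xs ++ [l]) rp (by simp; omega)
      have hpop2 := PySem.List.pop?_natCast xs rp hk
      have herase : (xs ++ [l]).eraseIdx rp = xs.eraseIdx rp ++ [l] :=
        List.eraseIdx_append_of_lt_length hk _
      have hcp := count_append_single_ne xs l (r + 1) hl1
      simp only [solutionStep, hcr, h0, hcp, h1.1, h1.2, hrp, hrp', hpop1, hpop2, herase,
        if_true, if_false, and_self]
      split_ifs with hx
      · rfl
      · exfalso; omega
    · have h1' : ¬ (r < n ∧ 0 < PySem.List.count (xs ++ [l]) (r + 1)) := by rw [hplus]; exact h1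
      simp only [solutionStep, hcr, h0, h1, h1', if_neg, not_false_iff, hminus]

lemma step_nil (n r : Int) : solutionStep n [] r = [] := by
  simp [solutionStep, solutionStep.solutionMinus, PySem.List.count]

lemma fold_nil (n : Int) (R : List Int) : R.foldl (solutionStep n) [] = [] := by
  induction R with
  | nil => rfl
  | cons r R ih => simp [List.foldl_cons, step_nil, ih]

lemma fold_dead (n l : Int) (xs Rs : List Int)
    (hd : ∀ r ∈ Rs, l > r + 1 ∨ (l = r + 1 ∧ ¬ r < n)) :
    Rs.foldl (solutionStep n) (xs ++ [l]) = Rs.foldl (solutionStep n) xs ++ [l] := by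
  induction Rs generalizing xs with
  | nil => rfl
  | cons r R ih =>
    simp only [List.foldl_cons, step_dead n r l xs (hd r (by simp))]
    exact ih _ (fun r' hr' => hd r' (by simp [hr']))

lemma core (n : Int) (k : Nat) : ∀ (Ld Rd : List Int), Ld.length + Rd.length ≤ k →
    Ld.Pairwise (· > ·) → Rd.Pairwise (· > ·) → (∀ x ∈ Ld, x ∉ Rd) →
    ∀ m : Int, ((Rd.foldl (solutionStep n) Ld.reverse).length : Int) + solutionAltGo n Ld Rd m
      = Ld.length + m := by
  induction k with
  | zero =>
    intro Ld Rd hlen _ _ _ m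
    have : Ld = [] := by cases Ld <;> simp_all
    have hR : Rd = [] := by cases Rd <;> simp_all
    subst this; subst hR; simp [solutionAltGo]
  | succ k ih =>
    intro Ld Rd hlen hL hR hdisj m
    match Ld, Rd with
    | [], Rd => cases Rd <;> simp [solutionAltGo, step_nil, fold_nil]
    | l :: L, [] => simp [solutionAltGo]
    | l :: L, r :: R =>
      have hLp : L.Pairwise (· > ·) := (List.pairwise_cons.mp hL).2
      have hRp : R.Pairwise (· > ·) := (List.pairwise_cons.mp hR).2
      have hlmax : ∀ x ∈ L, x < l := fun x hx => (List.pairwise_cons.mp hL).1 x hx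
      have hrmax : ∀ x ∈ R, x < r := fun x hx => (List.pairwise_cons.mp hR).1 x hx
      have hlr : l ≠ r := fun h => hdisj l (by simp) (by simp [h])
      have hrev : (l :: L).reverse = L.reverse ++ [l] := by simp
      have hnm : l ∉ L.reverse := by
        intro h; exact absurd (hlmax l (List.mem_reverse.mp h)) (lt_irrefl l)
      have hcnt0 : ¬ 0 < PySem.List.count (L.reverse ++ [l]) r := by
        rw [PySem.List.count_eq]
        simp only [Nat.pos_iff_ne_zero, ne_eq, not_not]
        refine List.count_eq_zero.mpr ?_
        intro hmem
        rcases List.mem_append.mp hmem with h | h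
        · exact hdisj r (List.mem_cons_of_mem _ (List.mem_reverse.mp h)) (List.mem_cons_self)
        · have : r = l := by simpa using h
          exact hlr this.symm
      by_cases hA : l = r + 1 ∧ r < n
      · -- A pops r+1 = l (the maximum of the lost list); B matches head-head
        have hidx : PySem.List.index? (L.reverse ++ [l]) (r + 1) = some L.reverse.length := by
          rw [← hA.1]; exact PySem.List.index?_append_singleton_self L.reverse l hnm
        have hpop := PySem.List.pop?_natCast (L.reverse ++ [l]) L.reverse.length (by simp)
        have herase : (L.reverse ++ [l]).eraseIdx L.reverse.length = L.reverse := by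
          simp [List.eraseIdx_append_of_length_le]
        have hcp : r < n ∧ 0 < PySem.List.count (L.reverse ++ [l]) (r + 1) := by
          refine ⟨hA.2, ?_⟩
          rw [PySem.List.count_eq]
          exact List.count_pos_iff.mpr (by simp [← hA.1])
        have hstep : solutionStep n (L.reverse ++ [l]) r = L.reverse := by
          simp only [solutionStep, if_neg hcnt0, if_pos hcp, hidx,
            if_pos (show ((L.reverse.length : Nat) : Int) > -1 by omega), hpop, herase]
        have hdj : ∀ x ∈ L, x ∉ R :=
          fun x hx hxr => hdisj x (List.mem_cons_of_mem _ hx) (List.mem_cons_of_mem _ hxr)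
        have hih := ih L R (by simp at hlen ⊢; omega) hLp hRp hdj (m + 1)
        rw [hrev, List.foldl_cons, hstep, solutionAltGo, if_pos hA]
        simp only [List.length_cons] at hih ⊢
        push_cast at hih ⊢
        omega
      · by_cases hB : l > r
        · -- l is dead for every remaining reserve: it passes through A's fold untouched
          have hdead : ∀ r' ∈ r :: R, l > r' + 1 ∨ (l = r' + 1 ∧ ¬ r' < n) := by
            intro r' hr'
            rcases List.mem_cons.mp hr' with h | h
            · subst h
              by_cases hl1 : l = r' + 1
              · exact Or.inr ⟨hl1, fun hn => hA ⟨hl1, hn⟩⟩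
              · exact Or.inl (by omega)
            · exact Or.inl (by have := hrmax r' h; omega)
          have hdj : ∀ x ∈ L, x ∉ r :: R := fun x hx => hdisj x (List.mem_cons_of_mem _ hx)
          have hih := ih L (r :: R) (by simp at hlen ⊢; omega) hLp hR hdj m
          rw [hrev, fold_dead n l L.reverse (r :: R) hdead, solutionAltGo, if_neg hA, if_pos hB]
          simp only [List.length_cons, List.length_append, List.length_nil] at hih ⊢
          push_cast at hih ⊢
          omega
        · have hlt : l < r := by
            rcases lt_trichotomy l r with h | h | h
            · exact h
            · exact absurd h hlr
            · exact absurd h hB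
          have hcle : ∀ x ∈ L.reverse ++ [l], x ≤ l := by
            intro x hx
            rcases List.mem_append.mp hx with h | h
            · exact le_of_lt (hlmax x (List.mem_reverse.mp h))
            · have : x = l := by simpa using h
              omega
          have hcp0 : ¬ (r < n ∧ 0 < PySem.List.count (L.reverse ++ [l]) (r + 1)) := by
            rintro ⟨-, hpos⟩
            rw [PySem.List.count_eq] at hpos
            have := hcle _ (List.count_pos_iff.mp hpos)
            omega
          by_cases hC : l = r - 1 ∧ r > 0
          · -- A pops r-1 = l; B matches head-head in its third branch
            have hidx : PySem.List.index? (L.reverse ++ [l]) (r - 1) = some L.reverse.length := by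
              rw [← hC.1]; exact PySem.List.index?_append_singleton_self L.reverse l hnm
            have hpop := PySem.List.pop?_natCast (L.reverse ++ [l]) L.reverse.length (by simp)
            have herase : (L.reverse ++ [l]).eraseIdx L.reverse.length = L.reverse := by
              simp [List.eraseIdx_append_of_length_le]
            have hcm : r > 0 ∧ 0 < PySem.List.count (L.reverse ++ [l]) (r - 1) := by
              refine ⟨hC.2, ?_⟩
              rw [PySem.List.count_eq]
              exact List.count_pos_iff.mpr (by simp [← hC.1])
            have hstep : solutionStep n (L.reverse ++ [l]) r = L.reverse := by
              simp only [solutionStep, solutionStep.solutionMinus, if_neg hcnt0, if_neg hcp0,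
                if_pos hcm, hidx, if_pos (show ((L.reverse.length : Nat) : Int) > -1 by omega),
                hpop, herase]
            have hdj : ∀ x ∈ L, x ∉ R :=
              fun x hx hxr => hdisj x (List.mem_cons_of_mem _ hx) (List.mem_cons_of_mem _ hxr)
            have hih := ih L R (by simp at hlen ⊢; omega) hLp hRp hdj (m + 1)
            rw [hrev, List.foldl_cons, hstep, solutionAltGo, if_neg hA, if_neg hB, if_pos hC]
            simp only [List.length_cons] at hih ⊢
            push_cast at hih ⊢
            omega
          · -- r helps nobody: A's step leaves the lost list unchanged; B drops r
            have hcm0 : ¬ (r > 0 ∧ 0 < PySem.List.count (L.reverse ++ [l]) (r - 1)) := by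
              rintro ⟨hr0, hpos⟩
              rw [PySem.List.count_eq] at hpos
              have := hcle _ (List.count_pos_iff.mp hpos)
              exact hC ⟨by omega, hr0⟩
            have hstep : solutionStep n (L.reverse ++ [l]) r = L.reverse ++ [l] := by
              simp only [solutionStep, solutionStep.solutionMinus, if_neg hcnt0, if_neg hcp0,
                if_neg hcm0]
            have hdj : ∀ x ∈ l :: L, x ∉ R := fun x hx hxr => hdisj x hx (List.mem_cons_of_mem _ hxr)
            have hih := ih (l :: L) R (by simp at hlen ⊢; omega) hL hRp hdj m
            rw [hrev, List.foldl_cons, hstep, ← hrev, solutionAltGo, if_neg hA, if_neg hB, if_neg hC]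
            simp only [List.length_cons] at hih ⊢
            push_cast at hih ⊢
            omega

lemma foldA_eq_reverse (f : List Int → Int → List Int) (xs init : List Int) :
    (PySem.List.pyRange (PySem.List.len xs - 1) (-1) (-1)).foldl
      (fun ls i => f ls (PySem.List.pyGetD xs i 0)) init = xs.reverse.foldl f init := by
  have h1 : PySem.List.pyRange (PySem.List.len xs - 1) (-1) (-1)
      = (PySem.List.pyRange 0 (PySem.List.len xs) 1).reverse := by
    rw [PySem.List.pyRange_neg_one_eq_reverse]; norm_num
  rw [h1, List.foldl_reverse, List.foldl_reverse]
  conv_rhs => rw [← PySem.List.map_pyGetD_pyRange_zero' xs 0]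
  rw [List.foldr_map]
  simp [PySem.List.len_eq]

-- sorted of a duplicate-free list is strictly increasing
lemma sorted_strict (s : List Int) (hs : s.Nodup) :
    (PySem.List.sorted s (fun x => x) false).Pairwise (· < ·) := by
  have hle := PySem.List.sorted_pairwise s (fun x => x)
  have hnd : (PySem.List.sorted s (fun x => x) false).Nodup :=
    (PySem.List.sorted_perm s (fun x => x) false).nodup_iff.mpr hs
  exact (hle.and hnd).imp (fun h => lt_of_le_of_ne h.1 h.2)

-- reverse=True sort is the reverse of the plain sort (duplicate-free input)
lemma sorted_rev_eq (s : List Int) (hs : s.Nodup) :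
    PySem.List.sorted s (fun x => x) true = (PySem.List.sorted s (fun x => x) false).reverse := by
  refine PySem.List.sorted_rev_eq_of_perm_of_pairwise_gt s _ _ ?_ ?_
  · exact (List.reverse_perm _).trans (PySem.List.sorted_perm s (fun x => x) false)
  · exact List.pairwise_reverse.mpr (sorted_strict s hs)

theorem solution_eq_alt (n : Int) (lost reserve : List Int) :
    solution n lost reserve = solution_alt n lost reserve := by
  show (let lostS := PySem.Set.ofList lost; let resS := PySem.Set.ofList reserve; let lost1 := PySem.Set.diff lostS resS; let res1 := PySem.Set.diff resS lostS; let lostL := PySem.List.sorted lost1 (fun x => x) false; let resL := PySem.List.sorted res1 (fun x => x) false; let final := (PySem.List.pyRange (PySem.List.len resL - 1) (-1) (-1)).foldl (fun ls i => solutionStep n ls (PySem.List.pyGetD resL i 0)) lostL; n - PySem.List.len final) =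
    (let L := PySem.List.sorted (PySem.Set.diff (PySem.Set.ofList lost) (PySem.Set.ofList reserve)) (fun x => x) true;
     let R := PySem.List.sorted (PySem.Set.diff (PySem.Set.ofList reserve) (PySem.Set.ofList lost)) (fun x => x) true;
     n - (PySem.List.len L - solutionAltGo n L R 0))
  simp only []
  set s1 := PySem.Set.diff (PySem.Set.ofList lost) (PySem.Set.ofList reserve) with hs1
  set s2 := PySem.Set.diff (PySem.Set.ofList reserve) (PySem.Set.ofList lost) with hs2
  have hnd1 : s1.Nodup := PySem.Set.nodup_diff _ _ (PySem.Set.nodup_ofList lost)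
  have hnd2 : s2.Nodup := PySem.Set.nodup_diff _ _ (PySem.Set.nodup_ofList reserve)
  set La := PySem.List.sorted s1 (fun x => x) false with hLa
  set Ra := PySem.List.sorted s2 (fun x => x) false with hRa
  rw [foldA_eq_reverse, sorted_rev_eq s1 hnd1, sorted_rev_eq s2 hnd2, ← hLa, ← hRa]
  have hdisj : ∀ x ∈ La.reverse, x ∉ Ra.reverse := by
    intro x hx hxr
    rw [List.mem_reverse, hLa, PySem.List.mem_sorted] at hx
    rw [List.mem_reverse, hRa, PySem.List.mem_sorted] at hxr
    exact ((PySem.Set.mem_diff _ _ x).mp hxr).2 ((PySem.Set.mem_diff _ _ x).mp hx).1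
  have hcore := core n (La.reverse.length + Ra.reverse.length) La.reverse Ra.reverse
    (le_refl _)
    (List.pairwise_reverse.mpr (sorted_strict s1 hnd1))
    (List.pairwise_reverse.mpr (sorted_strict s2 hnd2))
    hdisj 0
  rw [List.reverse_reverse] at hcore
  simp only [PySem.List.len_eq, List.length_reverse] at hcore ⊢
  omega

-- ===== VERDICT (by name: the statement is the Claim_ definition above) =====
theorem solution_spec : Claim_equal_solution :=
  fun n lost reserve _ => solution_eq_alt n lost reserve
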